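-- pv_equiv track=rewrite | github.com/Jazzballoon/Bots | Bedside Ben.py | parse_grade
-- ===== SOURCE A (Python) =====
-- def parse_grade(response_text):
--     """Extract grade data from bot response."""
--     if "---GRADE---" not in response_text:
--         return None
--     try:
--         block = response_text.split("---GRADE---")[1].split("---END GRADE---")[0].strip()
--         lines = block.strip().split("\n")
--         scores = {}
--         feedback = ""
--         for line in lines:
--             if line.startswith("Clarity:"):    scores["Clarity"]    = line.split(":")[1].strip()
--             if line.startswith("Evidence:"):   scores["Evidence"]   = line.split(":")[1].strip()
--             if line.startswith("Logic:"):      scores["Logic"]      = line.split(":")[1].strip()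
--             if line.startswith("Politeness:"): scores["Politeness"] = line.split(":")[1].strip()
--             if line.startswith("Total:"):      scores["Total"]      = line.split(":")[1].strip()
--             if line.startswith("Feedback:"):   feedback             = line.split(":", 1)[1].strip()
--         scores["Feedback"] = feedback
--         return scores
--     except Exception:
--         return None
-- ===== SOURCE B (Python) =====
-- _FIELDS = ["Clarity", "Evidence", "Logic", "Politeness", "Total"]
--
-- def _last_line_with(lines, prefix):
--     """Return the last line starting with prefix, or None."""
--     found = None
--     for line in lines:
--         if line.startswith(prefix):
--             found = line
--     return found
--
-- def parse_grade(response_text):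
--     """Extract grade data from bot response."""
--     if "---GRADE---" not in response_text:
--         return None
--     block = response_text.split("---GRADE---")[1].split("---END GRADE---")[0].strip()
--     lines = block.split("\n")
--     result = {}
--     for field in _FIELDS:
--         line = _last_line_with(lines, field + ":")
--         if line is not None:
--             result[field] = line.split(":")[1].strip()
--     fb = _last_line_with(lines, "Feedback:")
--     result["Feedback"] = fb.split(":", 1)[1].strip() if fb is not None else ""
--     return result
-- ===== Notes on version B (the rewrite author's own statement) =====
-- stated objective: simpler
-- what changed: Replaces A's single dispatch loop (one pass over the lines with six startswith branches updating a dict) by one scan per field: a shared last-matching-line helper is applied to each of the five score fields in a fixed table and to Feedback; Pre_ excludes inputs whose score fields first occur out of the canonical Clarity/Evidence/Logic/Politeness/Total order, where A's dict key order is an accident of line order and both orders denote the same mapping.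
import Mathlib
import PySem

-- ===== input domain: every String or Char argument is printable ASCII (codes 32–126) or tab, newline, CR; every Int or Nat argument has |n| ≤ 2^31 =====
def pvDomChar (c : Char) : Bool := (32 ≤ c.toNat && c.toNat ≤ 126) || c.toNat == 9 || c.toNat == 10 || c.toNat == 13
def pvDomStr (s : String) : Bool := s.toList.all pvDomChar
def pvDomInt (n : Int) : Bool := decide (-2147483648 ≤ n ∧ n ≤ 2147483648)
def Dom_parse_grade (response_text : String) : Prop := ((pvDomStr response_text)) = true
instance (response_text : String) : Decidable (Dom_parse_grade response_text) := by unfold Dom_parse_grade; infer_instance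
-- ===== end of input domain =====

-- B replaces A's single dispatch loop by one last-matching-line scan per field over a
-- fixed field table; inside Pre_ (score fields first occur in canonical order) the
-- resulting dicts are equal key order included.

-- ===== PORT A =====
-- line.split(":")[1].strip()  (index 1 exists whenever the line starts with "<Key>:",
-- which guards every use, so A's try/except never fires here; getD "" is unreachable)
def pvScoreVal (line : String) : String :=
  PySem.Str.strip ((PySem.List.pyGet? ((PySem.Str.split? line ":").getD []) 1).getD "")

-- line.split(":", 1)[1].strip()  (same remark: guarded by startswith "Feedback:")
def pvFbVal (line : String) : String :=
  PySem.Str.strip ((PySem.List.pyGet? ((PySem.Str.splitMax? line ":" 1).getD []) 1).getD "")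

-- the body of A's for-loop: state = (scores dict, feedback string)
def pvStepA (st : PySem.Dict String String × String) (line : String) :
    PySem.Dict String String × String :=
  let st1 := if PySem.Str.startswith line "Clarity:" = true then
      (st.1.insert "Clarity" (pvScoreVal line), st.2) else st
  let st2 := if PySem.Str.startswith line "Evidence:" = true then
      (st1.1.insert "Evidence" (pvScoreVal line), st1.2) else st1
  let st3 := if PySem.Str.startswith line "Logic:" = true then
      (st2.1.insert "Logic" (pvScoreVal line), st2.2) else st2
  let st4 := if PySem.Str.startswith line "Politeness:" = true then
      (st3.1.insert "Politeness" (pvScoreVal line), st3.2) else st3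
  let st5 := if PySem.Str.startswith line "Total:" = true then
      (st4.1.insert "Total" (pvScoreVal line), st4.2) else st4
  if PySem.Str.startswith line "Feedback:" = true then (st5.1, pvFbVal line) else st5

def parse_grade (response_text : String) : Option (List (String × String)) :=
  if PySem.Str.isIn "---GRADE---" response_text = false then none
  else
    -- try: … except: return None.  The only possible exception is the IndexError of
    -- [1] below (modelled by pyGet? = none); [0] of a split result always exists.
    match PySem.List.pyGet? ((PySem.Str.split? response_text "---GRADE---").getD []) 1 with
    | none => none
    | some afterMarker =>
      let block := PySem.Str.strip
        ((PySem.List.pyGet? ((PySem.Str.split? afterMarker "---END GRADE---").getD []) 0).getD "")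
      let lines := (PySem.Str.split? (PySem.Str.strip block) "\n").getD []
      let st := lines.foldl pvStepA (PySem.Dict.empty, "")
      some ((st.1.insert "Feedback" st.2).items)

-- ===== PORT B =====
def pvFields : List String := ["Clarity", "Evidence", "Logic", "Politeness", "Total"]

-- last line of `lines` starting with `pre`, or none
def lastLineWith (lines : List String) (pre : String) : Option String :=
  lines.foldl (fun found line => if PySem.Str.startswith line pre = true then some line else found)
    none

def parse_grade_alt (response_text : String) : Option (List (String × String)) :=
  if PySem.Str.isIn "---GRADE---" response_text = false then none
  else
    -- [1] would be an IndexError only if the marker were absent; it never is here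
    match PySem.List.pyGet? ((PySem.Str.split? response_text "---GRADE---").getD []) 1 with
    | none => none
    | some afterMarker =>
      let block := PySem.Str.strip
        ((PySem.List.pyGet? ((PySem.Str.split? afterMarker "---END GRADE---").getD []) 0).getD "")
      let lines := (PySem.Str.split? block "\n").getD []
      let result := pvFields.foldl (fun (d : PySem.Dict String String) field =>
          match lastLineWith lines (field ++ ":") with
          | some line => d.insert field (pvScoreVal line)
          | none => d) PySem.Dict.empty
      let fb := match lastLineWith lines "Feedback:" with
        | some l => pvFbVal l
        | none => ""
      some ((result.insert "Feedback" fb).items)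

-- ===== PRECONDITION & SPEC =====
-- the lines of the grade block (the same text both programs scan)
def pvPreLines (s : String) : List String :=
  (PySem.Str.split? (PySem.Str.strip
    ((PySem.List.pyGet? ((PySem.Str.split?
      ((PySem.List.pyGet? ((PySem.Str.split? s "---GRADE---").getD []) 1).getD "")
      "---END GRADE---").getD []) 0).getD "")) "\n").getD []

-- canonical index of the score field a line carries, if any
def pvFieldIdx (line : String) : Option Nat :=
  if PySem.Str.startswith line "Clarity:" = true then some 0
  else if PySem.Str.startswith line "Evidence:" = true then some 1
  else if PySem.Str.startswith line "Logic:" = true then some 2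
  else if PySem.Str.startswith line "Politeness:" = true then some 3
  else if PySem.Str.startswith line "Total:" = true then some 4
  else none

-- first occurrences, in order of first occurrence
def pvFirstOccs (l : List Nat) : List Nat :=
  l.foldl (fun acc n => if n ∈ acc then acc else acc ++ [n]) []

-- Pre_ excludes inputs whose score fields first occur in the grade block out of the
-- canonical Clarity/Evidence/Logic/Politeness/Total order: there A's dict key order is
-- an accident of line order, and A's and B's results are the same mapping in two orders.
def Pre_parse_grade (response_text : String) : Prop :=
  List.Pairwise (· < ·) (pvFirstOccs ((pvPreLines response_text).filterMap pvFieldIdx))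
instance (response_text : String) : Decidable (Pre_parse_grade response_text) := by
  unfold Pre_parse_grade; infer_instance

def pvWitness_parse_grade : String :=
  "---GRADE---\nClarity: 4\nTotal: 9\nFeedback: ok\n---END GRADE---"

def Spec_parse_grade (response_text : String) (out : Option (List (String × String))) : Prop := out = parse_grade_alt response_text
instance (response_text : String) (out : Option (List (String × String))) : Decidable (Spec_parse_grade response_text out) := by unfold Spec_parse_grade; infer_instance

-- ===== CLAIM (what is proved, stated in full; the proofs are below) =====
def Claim_equal_parse_grade : Prop := ∀ (response_text : String), Dom_parse_grade response_text → Pre_parse_grade response_text → Spec_parse_grade response_text (parse_grade response_text)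

-- ===== LEMMAS AND PROOFS =====

def pvScoreFields : List (String × String) :=
  [("Clarity:", "Clarity"), ("Evidence:", "Evidence"), ("Logic:", "Logic"),
   ("Politeness:", "Politeness"), ("Total:", "Total")]

def pvIdx (f : String × String) : Nat :=
  if f.2 = "Clarity" then 0 else if f.2 = "Evidence" then 1 else if f.2 = "Logic" then 2
  else if f.2 = "Politeness" then 3 else 4

-- dropWhile is idempotent
lemma pv_dropWhile_idem {α : Type} (p : α → Bool) (l : List α) :
    List.dropWhile p (List.dropWhile p l) = List.dropWhile p l := by
  induction l with
  | nil => rfl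
  | cons a t ih =>
    by_cases h : p a = true
    · simp [List.dropWhile, h, ih]
    · simp [List.dropWhile, h]

-- the head surviving dropWhile fails p
lemma pv_dropWhile_head {α : Type} (p : α → Bool) (l : List α) {a : α} {t : List α}
    (h : List.dropWhile p l = a :: t) : p a = false := by
  induction l with
  | nil => simp at h
  | cons b u ih =>
    by_cases hb : p b = true
    · exact ih (by simpa [List.dropWhile, hb] using h)
    · rw [List.dropWhile_cons_of_neg (by simp [hb])] at h
      cases h; simpa using hb

-- a prefix of a dropWhile-fixed list is dropWhile-fixed
lemma pv_dropWhile_prefix_fix {α : Type} (p : α → Bool) {l v : List α}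
    (hl : List.dropWhile p l = l) (hv : v <+: l) : List.dropWhile p v = v := by
  cases v with
  | nil => rfl
  | cons a t =>
    obtain ⟨r, hr⟩ := hv
    subst hr
    rw [List.cons_append] at hl
    have ha : p a = false := pv_dropWhile_head p (a :: (t ++ r)) hl
    simp [List.dropWhile, ha]

lemma pv_strip_idem (l : List Char) :
    PySem.Chars.strip (PySem.Chars.strip l) = PySem.Chars.strip l := by
  have hufix : List.dropWhile PySem.Chars.isspace (List.dropWhile PySem.Chars.isspace l)
      = List.dropWhile PySem.Chars.isspace l := pv_dropWhile_idem _ l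
  have hvpre : (List.dropWhile PySem.Chars.isspace
        (List.dropWhile PySem.Chars.isspace l).reverse).reverse
      <+: List.dropWhile PySem.Chars.isspace l := by
    obtain ⟨w, hw⟩ := List.dropWhile_suffix
      (l := (List.dropWhile PySem.Chars.isspace l).reverse) PySem.Chars.isspace
    exact ⟨w.reverse, by rw [← List.reverse_append, hw, List.reverse_reverse]⟩
  have hvfix := pv_dropWhile_prefix_fix PySem.Chars.isspace hufix hvpre
  unfold PySem.Chars.strip PySem.Chars.rstrip PySem.Chars.lstrip
  rw [hvfix, List.reverse_reverse, pv_dropWhile_idem]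

-- a string starting with prefix p shares p's first character
lemma pv_sw_head {line p : String} {c : Char}
    (hp : p.toList.head? = some c) (h : PySem.Str.startswith line p = true) :
    line.toList.head? = some c := by
  have h' : p.toList <+: line.toList := by
    have := (PySem.Chars.startswith_iff line.toList p.toList).1 (by simpa [PySem.Str.startswith] using h)
    exact this
  obtain ⟨t, ht⟩ := h'
  rw [← ht, List.head?_append, hp]
  rfl

-- prefixes with different first characters exclude one another
lemma pv_sw_excl {line p q : String} {c d : Char}
    (hp : p.toList.head? = some c) (hq : q.toList.head? = some d) (hcd : c ≠ d)
    (h : PySem.Str.startswith line p = true) : PySem.Str.startswith line q = false := by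
  by_contra hcon
  have h2 : PySem.Str.startswith line q = true := by
    cases hh : PySem.Str.startswith line q
    · exact absurd hh hcon
    · rfl
  have e1 := pv_sw_head hp h
  have e2 := pv_sw_head hq h2
  rw [e1] at e2
  exact hcd (by injection e2)

-- which score field (if any) a line carries; the five prefixes have pairwise
-- different first characters, so at most one matches
def pvMatched (line : String) : Option (String × String) :=
  if PySem.Str.startswith line "Clarity:" = true then some ("Clarity:", "Clarity")
  else if PySem.Str.startswith line "Evidence:" = true then some ("Evidence:", "Evidence")
  else if PySem.Str.startswith line "Logic:" = true then some ("Logic:", "Logic")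
  else if PySem.Str.startswith line "Politeness:" = true then some ("Politeness:", "Politeness")
  else if PySem.Str.startswith line "Total:" = true then some ("Total:", "Total")
  else none

lemma pv_fieldIdx_eq (line : String) : pvFieldIdx line = (pvMatched line).map pvIdx := by
  unfold pvFieldIdx pvMatched
  split_ifs <;> rfl

lemma pv_sw_unique {line : String} {f g : String × String}
    (hf : f ∈ pvScoreFields) (hg : g ∈ pvScoreFields) (hne : g ≠ f)
    (hswf : PySem.Str.startswith line f.1 = true) :
    PySem.Str.startswith line g.1 = false := by
  fin_cases hf <;> fin_cases hg <;>
    first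
      | exact absurd rfl hne
      | exact pv_sw_excl rfl rfl (by decide) hswf

lemma pv_matched_sw {line : String} {f : String × String} (h : pvMatched line = some f) :
    f ∈ pvScoreFields ∧ PySem.Str.startswith line f.1 = true := by
  unfold pvMatched at h
  split_ifs at h with h1 h2 h3 h4 h5 <;> cases h <;>
    simp_all [pvScoreFields]

lemma pv_matched_none {line : String} (h : pvMatched line = none) :
    ∀ g ∈ pvScoreFields, PySem.Str.startswith line g.1 = false := by
  unfold pvMatched at h
  split_ifs at h with h1 h2 h3 h4 h5
  intro g hg
  fin_cases hg <;> simp_all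

lemma pv_matched_other {line : String} {f : String × String} (h : pvMatched line = some f) :
    ∀ g ∈ pvScoreFields, g ≠ f → PySem.Str.startswith line g.1 = false := by
  obtain ⟨hf, hsw⟩ := pv_matched_sw h
  exact fun g hg hne => pv_sw_unique hf hg hne hsw

-- abstract single-line steps used to restate both loops
def pvDStep (d : PySem.Dict String String) (line : String) : PySem.Dict String String :=
  match pvMatched line with
  | some f => d.insert f.2 (pvScoreVal line)
  | none => d

def pvFStep (s : String) (line : String) : String :=
  if PySem.Str.startswith line "Feedback:" = true then pvFbVal line else s

def pvOStep (o : List (String × String)) (line : String) : List (String × String) :=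
  match pvMatched line with
  | some f => if f ∈ o then o else o ++ [f]
  | none => o

def pvDFold (lines : List String) : PySem.Dict String String :=
  lines.foldl pvDStep PySem.Dict.empty

def pvOrd (lines : List String) : List (String × String) :=
  lines.foldl pvOStep []

-- A's loop body, restated through pvMatched
lemma pv_stepA_eq (st : PySem.Dict String String × String) (line : String) :
    pvStepA st line = (pvDStep st.1 line, pvFStep st.2 line) := by
  unfold pvStepA pvDStep pvFStep pvMatched
  by_cases h1 : PySem.Str.startswith line "Clarity:" = true
  · have e2 := pv_sw_excl (q := "Evidence:") rfl rfl (by decide) h1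
    have e3 := pv_sw_excl (q := "Logic:") rfl rfl (by decide) h1
    have e4 := pv_sw_excl (q := "Politeness:") rfl rfl (by decide) h1
    have e5 := pv_sw_excl (q := "Total:") rfl rfl (by decide) h1
    simp only [h1, e2, e3, e4, e5]; split_ifs <;> simp_all
  · rw [Bool.not_eq_true] at h1
    by_cases h2 : PySem.Str.startswith line "Evidence:" = true
    · have e3 := pv_sw_excl (q := "Logic:") rfl rfl (by decide) h2
      have e4 := pv_sw_excl (q := "Politeness:") rfl rfl (by decide) h2
      have e5 := pv_sw_excl (q := "Total:") rfl rfl (by decide) h2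
      simp only [h1, h2, e3, e4, e5]; split_ifs <;> simp_all
    · rw [Bool.not_eq_true] at h2
      by_cases h3 : PySem.Str.startswith line "Logic:" = true
      · have e4 := pv_sw_excl (q := "Politeness:") rfl rfl (by decide) h3
        have e5 := pv_sw_excl (q := "Total:") rfl rfl (by decide) h3
        simp only [h1, h2, h3, e4, e5]; split_ifs <;> simp_all
      · rw [Bool.not_eq_true] at h3
        by_cases h4 : PySem.Str.startswith line "Politeness:" = true
        · have e5 := pv_sw_excl (q := "Total:") rfl rfl (by decide) h4
          simp only [h1, h2, h3, h4, e5]; split_ifs <;> simp_all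
        · rw [Bool.not_eq_true] at h4
          by_cases h5 : PySem.Str.startswith line "Total:" = true
          · simp only [h1, h2, h3, h4, h5]; split_ifs <;> simp_all
          · rw [Bool.not_eq_true] at h5
            simp only [h1, h2, h3, h4, h5]; split_ifs <;> simp_all

-- A's pair fold splits into the dict fold and the feedback fold
lemma pv_foldA_split (lines : List String) (d : PySem.Dict String String) (s : String) :
    lines.foldl pvStepA (d, s) = (lines.foldl pvDStep d, lines.foldl pvFStep s) := by
  induction lines generalizing d s with
  | nil => rfl
  | cons a t ih => rw [List.foldl_cons, pv_stepA_eq, List.foldl_cons, List.foldl_cons, ih]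

def pvOfOpt (o : Option String) : String :=
  match o with
  | some l => pvFbVal l
  | none => ""

-- the feedback fold computes pvFbVal of the last "Feedback:" line
lemma pv_fb_last (lines : List String) (o : Option String) :
    lines.foldl pvFStep (pvOfOpt o) = pvOfOpt (lines.foldl
      (fun found line => if PySem.Str.startswith line "Feedback:" = true then some line else found) o) := by
  induction lines generalizing o with
  | nil => rfl
  | cons a t ih =>
    rw [List.foldl_cons, List.foldl_cons]
    by_cases h : PySem.Str.startswith a "Feedback:" = true
    · rw [show pvFStep (pvOfOpt o) a = pvOfOpt (some a) from by unfold pvFStep; rw [if_pos h]; rfl,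
        if_pos h, ih]
    · rw [show pvFStep (pvOfOpt o) a = pvOfOpt o from by unfold pvFStep; rw [if_neg h],
        if_neg h, ih]

lemma pv_lastW_append (xs : List String) (a : String) (p : String) :
    lastLineWith (xs ++ [a]) p
      = if PySem.Str.startswith a p = true then some a else lastLineWith xs p := by
  simp [lastLineWith, List.foldl_append]

-- distinct fields have distinct keys
lemma pv_fields_snd_inj :
    ∀ f ∈ pvScoreFields, ∀ g ∈ pvScoreFields, f.2 = g.2 → f = g := by decide

lemma pv_idx_inj :
    ∀ f ∈ pvScoreFields, ∀ g ∈ pvScoreFields, pvIdx f = pvIdx g → f = g := by decide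

-- the heart: A's dict fold lists exactly the fields of pvOrd, each valued by its
-- last matching line
set_option maxHeartbeats 1600000 in
lemma pv_core (lines : List String) :
    (pvDFold lines).items
        = (pvOrd lines).map (fun f => (f.2, pvScoreVal ((lastLineWith lines f.1).getD "")))
      ∧ (pvOrd lines).Nodup
      ∧ ∀ f ∈ pvOrd lines, f ∈ pvScoreFields := by
  induction lines using List.reverseRecOn with
  | nil => refine ⟨rfl, List.nodup_nil, by simp [pvOrd]⟩
  | append_singleton xs a ih =>
    obtain ⟨hitems, hnd, hsub⟩ := ih
    have hD : pvDFold (xs ++ [a]) = pvDStep (pvDFold xs) a := by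
      simp [pvDFold, List.foldl_append]
    have hO : pvOrd (xs ++ [a]) = pvOStep (pvOrd xs) a := by
      simp [pvOrd, List.foldl_append]
    have hkeys : (pvDFold xs).keys = (pvOrd xs).map (·.2) := by
      simp only [PySem.Dict.keys, hitems, List.map_map]
      rfl
    cases hm : pvMatched a with
    | none =>
      have hall := pv_matched_none hm
      rw [hD, hO]
      have hO2 : pvOStep (pvOrd xs) a = pvOrd xs := by unfold pvOStep; rw [hm]
      refine ⟨?_, by rw [hO2]; exact hnd, by rw [hO2]; exact hsub⟩
      rw [show pvDStep (pvDFold xs) a = pvDFold xs from by unfold pvDStep; rw [hm],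
        show pvOStep (pvOrd xs) a = pvOrd xs from by unfold pvOStep; rw [hm], hitems]
      refine List.map_congr_left fun f hf => ?_
      rw [pv_lastW_append, if_neg (by rw [hall f (hsub f hf)]; simp)]
    | some f0 =>
      obtain ⟨hf0, hsw0⟩ := pv_matched_sw hm
      have hoth := pv_matched_other hm
      have hmemkeys : f0.2 ∈ (pvDFold xs).keys ↔ f0 ∈ pvOrd xs := by
        rw [hkeys]
        constructor
        · rintro h
          obtain ⟨g, hg, hgeq⟩ := List.mem_map.1 h
          have := pv_fields_snd_inj g (hsub g hg) f0 hf0 hgeq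
          exact this ▸ hg
        · intro h; exact List.mem_map_of_mem h
      by_cases hin : f0 ∈ pvOrd xs
      · have hcont : (pvDFold xs).contains f0.2 = true := by
          rw [PySem.Dict.contains_eq_decide_mem_keys]
          exact decide_eq_true (hmemkeys.2 hin)
        rw [hD, hO]
        have hO2 : pvOStep (pvOrd xs) a = pvOrd xs := by unfold pvOStep; rw [hm]; exact if_pos hin
        refine ⟨?_, by rw [hO2]; exact hnd, by rw [hO2]; exact hsub⟩
        rw [show pvDStep (pvDFold xs) a = (pvDFold xs).insert f0.2 (pvScoreVal a) from by
              unfold pvDStep; rw [hm],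
          hO2, PySem.Dict.items_insert_of_contains _ _ hcont, hitems, List.map_map]
        refine List.map_congr_left fun f hf => ?_
        simp only [Function.comp_apply]
        rw [pv_lastW_append]
        by_cases hfe : f = f0
        · subst hfe
          rw [if_pos hsw0]
          simp
        · have hne2 : f.2 ≠ f0.2 := fun hc =>
            hfe (pv_fields_snd_inj f (hsub f hf) f0 hf0 hc)
          rw [if_neg (show ¬((f.2 == f0.2) = true) from by simpa using hne2),
            if_neg (show ¬(PySem.Str.startswith a f.1 = true) from by
              rw [hoth f (hsub f hf) hfe]; simp)]
      · have hcont : (pvDFold xs).contains f0.2 = false := by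
          rw [PySem.Dict.contains_eq_decide_mem_keys]
          exact decide_eq_false (fun hc => hin (hmemkeys.1 hc))
        rw [hD, hO]
        have hOstep : pvOStep (pvOrd xs) a = pvOrd xs ++ [f0] := by
          unfold pvOStep; rw [hm]; exact if_neg hin
        refine ⟨?_, ?_, ?_⟩
        · rw [show pvDStep (pvDFold xs) a = (pvDFold xs).insert f0.2 (pvScoreVal a) from by
                unfold pvDStep; rw [hm],
            PySem.Dict.items_insert_of_not_contains _ _ hcont, hitems, hOstep,
            List.map_append, List.map_singleton]
          refine congrArg₂ (· ++ ·) ?_ ?_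
          · refine List.map_congr_left fun f hf => ?_
            rw [pv_lastW_append,
              if_neg (by rw [hoth f (hsub f hf) (fun hc => hin (hc ▸ hf))]; simp)]
          · rw [pv_lastW_append, if_pos hsw0]
            simp
        · rw [hOstep]
          exact hnd.append (List.nodup_singleton f0)
            (fun x hx hy => hin (by rwa [List.mem_singleton.1 hy] at hx))
        · rw [hOstep]
          intro f hf
          rcases List.mem_append.1 hf with h | h
          · exact hsub f h
          · simpa using (List.mem_singleton.1 h) ▸ hf0

-- membership in pvOrd = a matching line exists
lemma pv_mem_ord (lines : List String) (f : String × String) (hf : f ∈ pvScoreFields) :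
    f ∈ pvOrd lines ↔ (lastLineWith lines f.1).isSome = true := by
  induction lines using List.reverseRecOn with
  | nil => simp [pvOrd, lastLineWith]
  | append_singleton xs a ih =>
    have hO : pvOrd (xs ++ [a]) = pvOStep (pvOrd xs) a := by
      simp [pvOrd, List.foldl_append]
    rw [hO, pv_lastW_append]
    cases hm : pvMatched a with
    | none =>
      rw [show pvOStep (pvOrd xs) a = pvOrd xs from by unfold pvOStep; rw [hm],
        if_neg (by rw [pv_matched_none hm f hf]; simp)]
      exact ih
    | some f0 =>
      by_cases hfe : f = f0
      · subst hfe
        rw [if_pos (pv_matched_sw hm).2]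
        unfold pvOStep
        rw [hm]; dsimp only
        constructor
        · intro _; rfl
        · intro _
          by_cases hin : f ∈ pvOrd xs
          · rw [if_pos hin]; exact hin
          · rw [if_neg hin]; simp
      · rw [if_neg (by rw [pv_matched_other hm f hf hfe]; simp)]
        unfold pvOStep
        rw [hm]; dsimp only
        have : f ∈ (if f0 ∈ pvOrd xs then pvOrd xs else pvOrd xs ++ [f0]) ↔ f ∈ pvOrd xs := by
          split_ifs
          · rfl
          · simp [hfe]
        rw [this]
        exact ih

-- the Pre_ sequence is pvOrd's canonical-index sequence
lemma pv_firstOccs_map (lines : List String) :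
    pvFirstOccs (lines.filterMap pvFieldIdx) = (pvOrd lines).map pvIdx := by
  induction lines using List.reverseRecOn with
  | nil => rfl
  | append_singleton xs a ih =>
    have hsub := (pv_core xs).2.2
    rw [List.filterMap_append]
    have hO : pvOrd (xs ++ [a]) = pvOStep (pvOrd xs) a := by
      simp [pvOrd, List.foldl_append]
    rw [hO]
    cases hm : pvMatched a with
    | none =>
      rw [show pvOStep (pvOrd xs) a = pvOrd xs from by unfold pvOStep; rw [hm], ← ih]
      have : List.filterMap pvFieldIdx [a] = [] := by
        simp [List.filterMap, pv_fieldIdx_eq, hm]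
      rw [this, List.append_nil]
    | some f0 =>
      have hf0 := (pv_matched_sw hm).1
      have hfa : List.filterMap pvFieldIdx [a] = [pvIdx f0] := by
        simp [List.filterMap, pv_fieldIdx_eq, hm]
      rw [hfa]
      unfold pvFirstOccs
      rw [List.foldl_append]
      show (if pvIdx f0 ∈ pvFirstOccs (xs.filterMap pvFieldIdx) then _ else _) = _
      rw [ih]
      have hmem : pvIdx f0 ∈ (pvOrd xs).map pvIdx ↔ f0 ∈ pvOrd xs := by
        constructor
        · intro h
          obtain ⟨g, hg, hgeq⟩ := List.mem_map.1 h
          exact (pv_idx_inj g (hsub g hg) f0 hf0 hgeq) ▸ hg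
        · exact List.mem_map_of_mem
      unfold pvOStep
      rw [hm]; dsimp only
      by_cases hin : f0 ∈ pvOrd xs
      · rw [if_pos (hmem.2 hin), if_pos hin]
        exact ih
      · rw [if_neg (fun h => hin (hmem.1 h)), if_neg hin, List.map_append, List.map_singleton]
        exact congrArg (fun l => l ++ [pvIdx f0]) ih

-- B's fold over the field table, through the canonical pair table
lemma pv_alt_fold (lines : List String) :
    pvFields.foldl (fun (d : PySem.Dict String String) field =>
        match lastLineWith lines (field ++ ":") with
        | some line => d.insert field (pvScoreVal line)
        | none => d) PySem.Dict.empty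
      = pvScoreFields.foldl (fun (d : PySem.Dict String String) f =>
          match lastLineWith lines f.1 with
          | some line => d.insert f.2 (pvScoreVal line)
          | none => d) PySem.Dict.empty := by
  rfl

-- folding the match over a list = folding the insert over its present sublist
lemma pv_fold_filter (fs : List (String × String)) (lines : List String)
    (d : PySem.Dict String String) :
    fs.foldl (fun (d : PySem.Dict String String) f =>
        match lastLineWith lines f.1 with
        | some line => d.insert f.2 (pvScoreVal line)
        | none => d) d
      = (fs.filter (fun f => (lastLineWith lines f.1).isSome)).foldl
          (fun (d : PySem.Dict String String) f =>
            d.insert f.2 (pvScoreVal ((lastLineWith lines f.1).getD ""))) d := by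
  induction fs generalizing d with
  | nil => rfl
  | cons a t ih =>
    rw [List.foldl_cons]
    cases hl : lastLineWith lines a.1 with
    | none =>
      rw [List.filter_cons_of_neg (by simp [hl]), ih]
    | some line =>
      rw [List.filter_cons_of_pos (by simp [hl]), List.foldl_cons, hl, ih]
      simp

-- under the canonical order, pvOrd is exactly the present fields in table order
lemma pv_ord_canonical (lines : List String)
    (hs : List.Pairwise (fun f g => pvIdx f < pvIdx g) (pvOrd lines)) :
    pvOrd lines = pvScoreFields.filter (fun f => (lastLineWith lines f.1).isSome) := by
  obtain ⟨_, hnd, hsub⟩ := pv_core lines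
  have hndP : (pvScoreFields.filter (fun f => (lastLineWith lines f.1).isSome)).Nodup :=
    List.Nodup.filter _ (by decide)
  have hmem : ∀ f, f ∈ pvOrd lines ↔
      f ∈ pvScoreFields.filter (fun f => (lastLineWith lines f.1).isSome) := by
    intro f
    rw [List.mem_filter]
    constructor
    · intro h
      exact ⟨hsub f h, (pv_mem_ord lines f (hsub f h)).1 h⟩
    · rintro ⟨h1, h2⟩
      exact (pv_mem_ord lines f h1).2 h2
  have hperm : List.Perm (pvOrd lines) (pvScoreFields.filter (fun f => (lastLineWith lines f.1).isSome)) :=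
    (List.perm_ext_iff_of_nodup hnd hndP).2 hmem
  have hsP : List.Pairwise (fun f g => pvIdx f < pvIdx g)
      (pvScoreFields.filter (fun f => (lastLineWith lines f.1).isSome)) :=
    List.Pairwise.filter _ (by decide)
  exact List.Perm.eq_of_pairwise
    (fun a b _ _ h1 h2 => absurd (Nat.lt_trans h1 h2) (Nat.lt_irrefl _)) hs hsP hperm

-- the two stripped-and-split line lists coincide (strip is idempotent)
lemma pv_lines_eq (s : String) :
    (PySem.Str.split? (PySem.Str.strip (PySem.Str.strip s)) "\n").getD []
      = (PySem.Str.split? (PySem.Str.strip s) "\n").getD [] := by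
  unfold PySem.Str.split?
  have h : (PySem.Str.strip (PySem.Str.strip s)).toList = (PySem.Str.strip s).toList := by
    rw [PySem.Str.toList_strip, PySem.Str.toList_strip, pv_strip_idem]
  rw [h]

-- the full agreement on any canonical-order list of lines
lemma pv_lines_agree (lines : List String)
    (hs : List.Pairwise (fun f g => pvIdx f < pvIdx g) (pvOrd lines)) :
    ((lines.foldl pvStepA (PySem.Dict.empty, "")).1.insert "Feedback"
        (lines.foldl pvStepA (PySem.Dict.empty, "")).2).items
      = (((pvFields.foldl (fun (d : PySem.Dict String String) field =>
            match lastLineWith lines (field ++ ":") with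
            | some line => d.insert field (pvScoreVal line)
            | none => d) PySem.Dict.empty).insert "Feedback"
          (match lastLineWith lines "Feedback:" with
           | some l => pvFbVal l
           | none => "")).items) := by
  obtain ⟨hitems, hnd, hsub⟩ := pv_core lines
  have hfb : (lines.foldl pvStepA (PySem.Dict.empty, "")).2
      = (match lastLineWith lines "Feedback:" with
         | some l => pvFbVal l
         | none => "") := by
    rw [pv_foldA_split]
    have := pv_fb_last lines none
    simpa [pvOfOpt, lastLineWith] using this
  have hd1 : (lines.foldl pvStepA (PySem.Dict.empty, "")).1 = pvDFold lines := by
    rw [pv_foldA_split]; rfl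
  have hscores : pvFields.foldl (fun (d : PySem.Dict String String) field =>
        match lastLineWith lines (field ++ ":") with
        | some line => d.insert field (pvScoreVal line)
        | none => d) PySem.Dict.empty = pvDFold lines := by
    rw [pv_alt_fold, pv_fold_filter, ← pv_ord_canonical lines hs]
    apply PySem.Dict.ext
    rw [PySem.Dict.items_foldl_insert_fresh (pvOrd lines) (·.2)
        (fun f => pvScoreVal ((lastLineWith lines f.1).getD "")) PySem.Dict.empty
        (fun f _ => PySem.Dict.contains_empty f.2)
        (List.Nodup.map_on (fun x hx y hy hxy =>
          pv_fields_snd_inj x (hsub x hx) y (hsub y hy) hxy) hnd),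
      hitems]
    rfl
  rw [hfb, hd1, hscores]

-- ===== VERDICT (by name: the statement is the Claim_ definition above) =====
theorem parse_grade_spec : Claim_equal_parse_grade := by
  intro response_text _ hpre
  unfold Spec_parse_grade parse_grade parse_grade_alt
  by_cases hin : PySem.Str.isIn "---GRADE---" response_text = false
  · rw [if_pos hin, if_pos hin]
  · rw [if_neg hin, if_neg hin]
    cases hsplit : PySem.List.pyGet?
        ((PySem.Str.split? response_text "---GRADE---").getD []) 1 with
    | none => rfl
    | some afterMarker =>
      simp only
      rw [pv_lines_eq]
      apply congrArg some
      apply pv_lines_agree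
      have hlines : pvPreLines response_text
          = (PySem.Str.split? (PySem.Str.strip
              ((PySem.List.pyGet? ((PySem.Str.split? afterMarker "---END GRADE---").getD []) 0).getD ""))
              "\n").getD [] := by
        unfold pvPreLines
        rw [hsplit]
        rfl
      unfold Pre_parse_grade at hpre
      rw [hlines, pv_firstOccs_map] at hpre
      exact (List.pairwise_map.1 hpre)
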